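-- pv_equiv track=rewrite | github.com/Ya-kuku/Algorithm_practice | 프로그래머스/방문 길이.py | solution
-- ===== SOURCE A (Python) =====
-- dir = {'U':(-1,0),'D':(1,0),'R':(0,1),'L':(0,-1)}
--
-- def solution(dirs):
--     answer = 0
--     visited = set()
--     x,y = 5,5
--     for i in range(len(dirs)):
--         nx = x + dir[dirs[i]][0]
--         ny = y + dir[dirs[i]][1]
--         if nx < 0 or nx >= 11 or ny < 0 or ny >= 11: continue
--         if (x,y,nx,ny) not in visited:
--             visited.add((x,y,nx,ny))
--             # 걸어간 길은 양방향성을 고려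
--             visited.add((nx,ny,x,y))
--             answer += 1
--         x = nx
--         y = ny
--
--     return answer
-- ===== SOURCE B (Python) =====
-- def solution(dirs):
--     # Phase 1: build the clamped trajectory of visited cells.
--     delta = {'U': (-1, 0), 'D': (1, 0), 'R': (0, 1), 'L': (0, -1)}
--     path = [(5, 5)]
--     for c in dirs:
--         x, y = path[-1]
--         dx, dy = delta[c]
--         nx, ny = x + dx, y + dy
--         if 0 <= nx < 11 and 0 <= ny < 11:
--             path.append((nx, ny))
--     # Phase 2: count distinct undirected edges between consecutive cells.
--     edges = set()
--     for p, q in zip(path, path[1:]):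
--         edges.add((p, q) if p <= q else (q, p))
--     return len(edges)
-- ===== Notes on version B (the rewrite author's own statement) =====
-- stated objective: alternative
-- what changed: Replaced A's single interleaved pass (mutable position, manual counter, set holding both orientations of each edge) by a two-phase decomposition: first build the clamped trajectory of cells, then canonicalize each consecutive pair as a lex-sorted undirected edge and return the size of the resulting set.
import Mathlib
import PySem

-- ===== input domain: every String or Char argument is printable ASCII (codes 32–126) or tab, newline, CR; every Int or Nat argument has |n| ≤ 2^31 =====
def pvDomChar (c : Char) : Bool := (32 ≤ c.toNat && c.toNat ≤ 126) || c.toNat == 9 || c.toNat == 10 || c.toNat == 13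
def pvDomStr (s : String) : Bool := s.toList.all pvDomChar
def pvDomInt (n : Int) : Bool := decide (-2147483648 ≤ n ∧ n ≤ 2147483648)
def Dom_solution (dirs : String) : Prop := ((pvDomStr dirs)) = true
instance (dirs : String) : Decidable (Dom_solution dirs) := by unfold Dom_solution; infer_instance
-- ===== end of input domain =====

-- B is an ALTERNATIVE decomposition (same cost): build the clamped trajectory first, then count
-- distinct canonicalized undirected edges of consecutive cells, instead of A's interleaved
-- counter + both-orientations set.

-- ===== PORT A =====
-- the module-level dict dir = {'U':(-1,0),'D':(1,0),'R':(0,1),'L':(0,-1)}; lookup of any other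
-- key is a KeyError, excluded by Pre_solution (the (0,0) default is never reached under Pre_)
def dirA (c : Char) : Int × Int :=
  if c = 'U' then (-1, 0) else if c = 'D' then (1, 0)
  else if c = 'R' then (0, 1) else if c = 'L' then (0, -1) else (0, 0)

-- one iteration of A's for-loop; state = (answer, visited, x, y)
def stepA (st : Int × PySem.Set (Int × Int × Int × Int) × Int × Int) (c : Char) :
    Int × PySem.Set (Int × Int × Int × Int) × Int × Int :=
  let answer := st.1; let visited := st.2.1; let x := st.2.2.1; let y := st.2.2.2
  let nx := x + (dirA c).1
  let ny := y + (dirA c).2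
  if nx < 0 ∨ 11 ≤ nx ∨ ny < 0 ∨ 11 ≤ ny then st
  else if (x, y, nx, ny) ∈ visited then (answer, visited, nx, ny)
  else (answer + 1, PySem.Set.add (PySem.Set.add visited (x, y, nx, ny)) (nx, ny, x, y), nx, ny)

-- 'for i in range(len(dirs)): … dirs[i] …' visits the characters of dirs in order
def solution (dirs : String) : Int :=
  (dirs.toList.foldl stepA (0, PySem.Set.empty, 5, 5)).1

-- ===== PORT B =====
-- B's local dict delta = {'U':(-1,0),'D':(1,0),'R':(0,1),'L':(0,-1)}
def deltaB : PySem.Dict Char (Int × Int) :=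
  PySem.Dict.ofList [('U', (-1, 0)), ('D', (1, 0)), ('R', (0, 1)), ('L', (0, -1))]

-- delta[c]; the KeyError (key absent) is excluded by Pre_solution, so the default is unreachable
def dirB (c : Char) : Int × Int := (PySem.Dict.get? deltaB c).getD (0, 0)

-- '(p, q) if p <= q else (q, p)' — Python tuple comparison is lexicographic
def canonB (p q : Int × Int) : (Int × Int) × (Int × Int) :=
  if p.1 < q.1 ∨ (p.1 = q.1 ∧ p.2 ≤ q.2) then (p, q) else (q, p)

-- phase 1 loop body: append the candidate cell iff it is on the board; path[-1] via pyGetD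
def stepB (path : List (Int × Int)) (c : Char) : List (Int × Int) :=
  let xy := PySem.List.pyGetD path (-1) ((0 : Int), (0 : Int))
  let nx := xy.1 + (dirB c).1
  let ny := xy.2 + (dirB c).2
  if 0 ≤ nx ∧ nx < 11 ∧ 0 ≤ ny ∧ ny < 11 then path ++ [(nx, ny)] else path

-- phase 2: canonical undirected edges of consecutive trajectory cells
def edgesB (path : List (Int × Int)) : List ((Int × Int) × (Int × Int)) :=
  (path.zip path.tail).map (fun pq => canonB pq.1 pq.2)

def solution_alt (dirs : String) : Int :=
  ((PySem.Set.ofList (edgesB (dirs.toList.foldl stepB [(5, 5)]))).length : Int)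

-- ===== PRECONDITION & SPEC =====
-- Pre_ excludes exactly the strings containing a character other than U/D/R/L, on which
-- Python A raises KeyError (dir[dirs[i]]).
def Pre_solution (dirs : String) : Prop :=
  (dirs.toList.all (fun c => c == 'U' || c == 'D' || c == 'R' || c == 'L')) = true
instance (dirs : String) : Decidable (Pre_solution dirs) := by unfold Pre_solution; infer_instance

def pvWitness_solution : String := "UD"

def Spec_solution (dirs : String) (out : Int) : Prop := out = solution_alt dirs
instance (dirs : String) (out : Int) : Decidable (Spec_solution dirs out) := by unfold Spec_solution; infer_instance

-- ===== CLAIM (what is proved, stated in full; the proofs are below) =====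
def Claim_equal_solution : Prop := ∀ (dirs : String), Dom_solution dirs → Pre_solution dirs → Spec_solution dirs (solution dirs)

-- ===== LEMMAS AND PROOFS =====

lemma dir_eq (c : Char) : dirA c = dirB c := by
  unfold dirA dirB
  split_ifs with h1 h2 h3 h4
  · rw [h1]; rfl
  · rw [h2]; rfl
  · rw [h3]; rfl
  · rw [h4]; rfl
  · have hitems : deltaB.items =
        [('U', ((-1 : Int), (0 : Int))), ('D', (1, 0)), ('R', (0, 1)), ('L', (0, -1))] := rfl
    symm
    rw [show deltaB.get? c =
        Option.map (fun x => x.2) (List.find? (fun p => p.1 == c) deltaB.items) from rfl, hitems]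
    rw [List.find?_cons_of_neg (by simp [Ne.symm h1]),
        List.find?_cons_of_neg (by simp [Ne.symm h2]),
        List.find?_cons_of_neg (by simp [Ne.symm h3]),
        List.find?_cons_of_neg (by simp [Ne.symm h4])]
    rfl

lemma canon_comm (p q : Int × Int) : canonB p q = canonB q p := by
  obtain ⟨a, b⟩ := p; obtain ⟨c, d⟩ := q
  simp only [canonB]
  split_ifs <;> simp_all [Prod.ext_iff] <;> omega

lemma canon_eq_iff (p q r s : Int × Int) :
    canonB p q = canonB r s ↔ (p = r ∧ q = s) ∨ (p = s ∧ q = r) := by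
  obtain ⟨a, b⟩ := p; obtain ⟨c, d⟩ := q; obtain ⟨e, f⟩ := r; obtain ⟨g, h⟩ := s
  simp only [canonB, Prod.ext_iff]
  split_ifs <;> simp_all <;> omega

lemma zip_tail_append (xs : List (Int × Int)) (hne : xs ≠ []) (n : Int × Int) :
    (xs ++ [n]).zip (xs ++ [n]).tail = xs.zip xs.tail ++ [(xs.getLast hne, n)] := by
  induction xs with
  | nil => exact absurd rfl hne
  | cons a tl ih =>
    cases tl with
    | nil => simp [List.getLast]
    | cons b tl2 =>
      have := ih (by simp)
      simp only [List.cons_append, List.zip_cons_cons, List.tail_cons] at this ⊢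
      rw [this]
      simp [List.getLast]

lemma edgesB_append (xs : List (Int × Int)) (hne : xs ≠ []) (n : Int × Int) :
    edgesB (xs ++ [n]) = edgesB xs ++ [canonB (xs.getLast hne) n] := by
  unfold edgesB
  rw [zip_tail_append xs hne n, List.map_append]
  rfl

-- the loop invariant tying A's state after a prefix to B's trajectory of that prefix
def InvAB (st : Int × PySem.Set (Int × Int × Int × Int) × Int × Int)
    (path : List (Int × Int)) : Prop :=
  path ≠ [] ∧
  st.2.2 = PySem.List.pyGetD path (-1) ((0 : Int), (0 : Int)) ∧
  (∀ p q : Int × Int, (p.1, p.2, q.1, q.2) ∈ st.2.1 ↔ canonB p q ∈ edgesB path) ∧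
  st.1 = ((PySem.Set.ofList (edgesB path)).length : Int)

lemma inv_step (st : Int × PySem.Set (Int × Int × Int × Int) × Int × Int)
    (path : List (Int × Int)) (c : Char) (hinv : InvAB st path) :
    InvAB (stepA st c) (stepB path c) := by
  obtain ⟨hne, hxy, hvis, hans⟩ := hinv
  obtain ⟨answer, visited, x, y⟩ := st
  simp only at hxy hvis hans
  have hlast : PySem.List.pyGetD path (-1) ((0 : Int), (0 : Int)) = path.getLast hne :=
    PySem.List.pyGetD_neg_one _ _ hne
  by_cases hb : 0 ≤ x + (dirA c).1 ∧ x + (dirA c).1 < 11 ∧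
      0 ≤ y + (dirA c).2 ∧ y + (dirA c).2 < 11
  · -- in bounds: A does not continue, B appends
    have hstepB : stepB path c = path ++ [(x + (dirA c).1, y + (dirA c).2)] := by
      unfold stepB
      rw [← dir_eq, ← hxy]
      simp only
      rw [if_pos hb]
    have hgl : path.getLast hne = (x, y) := by rw [← hlast, ← hxy]
    have hedges : edgesB (path ++ [(x + (dirA c).1, y + (dirA c).2)]) =
        edgesB path ++ [canonB (x, y) (x + (dirA c).1, y + (dirA c).2)] := by
      rw [edgesB_append path hne _, hgl]
    have hmemiff : ((x, y, x + (dirA c).1, y + (dirA c).2) ∈ visited) ↔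
        canonB (x, y) (x + (dirA c).1, y + (dirA c).2) ∈ edgesB path := by
      simpa using hvis (x, y) (x + (dirA c).1, y + (dirA c).2)
    by_cases hv : (x, y, x + (dirA c).1, y + (dirA c).2) ∈ visited
    · -- edge already seen
      have he : canonB (x, y) (x + (dirA c).1, y + (dirA c).2) ∈ edgesB path := hmemiff.mp hv
      have hstepA : stepA (answer, visited, x, y) c =
          (answer, visited, x + (dirA c).1, y + (dirA c).2) := by
        unfold stepA
        simp only
        rw [if_neg (by omega), if_pos hv]
      rw [hstepA, hstepB]
      refine ⟨by simp, by simp [pysem], ?_, ?_⟩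
      · intro p q
        rw [hvis p q, hedges]
        simp only [List.mem_append, List.mem_singleton]
        constructor
        · exact Or.inl
        · rintro (h | h)
          · exact h
          · rcases (canon_eq_iff p q (x, y) (x + (dirA c).1, y + (dirA c).2)).mp h with
              ⟨hp, hq⟩ | ⟨hp, hq⟩
            · rw [hp, hq]; exact he
            · rw [hp, hq, canon_comm]; exact he
      · simp only [hans, hedges, PySem.Set.ofList_append_singleton,
          PySem.Set.add_of_mem ((PySem.Set.mem_ofList _ _).mpr he)]
    · -- new edge
      have he : canonB (x, y) (x + (dirA c).1, y + (dirA c).2) ∉ edgesB path :=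
        fun h => hv (hmemiff.mpr h)
      have hstepA : stepA (answer, visited, x, y) c =
          (answer + 1,
            PySem.Set.add (PySem.Set.add visited (x, y, x + (dirA c).1, y + (dirA c).2))
              (x + (dirA c).1, y + (dirA c).2, x, y),
            x + (dirA c).1, y + (dirA c).2) := by
        unfold stepA
        simp only
        rw [if_neg (by omega), if_neg hv]
      rw [hstepA, hstepB]
      refine ⟨by simp, by simp [pysem], ?_, ?_⟩
      · intro p q
        rw [hedges]
        simp only [PySem.Set.mem_add, List.mem_append, List.mem_singleton]
        rw [hvis p q, canon_eq_iff p q (x, y) (x + (dirA c).1, y + (dirA c).2)]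
        constructor
        · rintro ((h | h) | h)
          · exact Or.inl h
          · refine Or.inr (Or.inl ?_)
            obtain ⟨a, b⟩ := p; obtain ⟨u, v⟩ := q
            simp only [Prod.mk.injEq] at h ⊢
            exact ⟨⟨h.1, h.2.1⟩, ⟨h.2.2.1, h.2.2.2⟩⟩
          · refine Or.inr (Or.inr ?_)
            obtain ⟨a, b⟩ := p; obtain ⟨u, v⟩ := q
            simp only [Prod.mk.injEq] at h ⊢
            exact ⟨⟨h.1, h.2.1⟩, ⟨h.2.2.1, h.2.2.2⟩⟩
        · rintro (h | ⟨hp, hq⟩ | ⟨hp, hq⟩)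
          · exact Or.inl (Or.inl h)
          · exact Or.inl (Or.inr (by rw [hp, hq]))
          · exact Or.inr (by rw [hp, hq])
      · have hnotin : canonB (x, y) (x + (dirA c).1, y + (dirA c).2) ∉
            PySem.Set.ofList (edgesB path) := by
          rw [PySem.Set.mem_ofList]; exact he
        simp only [hans, hedges, PySem.Set.ofList_append_singleton,
          PySem.Set.add_of_not_mem hnotin, List.length_append, List.length_singleton]
        push_cast
        ring
  · -- out of bounds: both leave their state unchanged
    have hstepA : stepA (answer, visited, x, y) c = (answer, visited, x, y) := by
      unfold stepA
      simp only
      rw [if_pos (by omega)]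
    have hstepB : stepB path c = path := by
      unfold stepB
      rw [← dir_eq, ← hxy]
      simp only
      rw [if_neg hb]
    rw [hstepA, hstepB]
    exact ⟨hne, hxy, hvis, hans⟩

lemma inv_foldl (l : List Char) :
    InvAB (l.foldl stepA (0, PySem.Set.empty, 5, 5)) (l.foldl stepB [(5, 5)]) := by
  induction l using List.reverseRecOn with
  | nil =>
    refine ⟨by simp, by simp [pysem], ?_, by rfl⟩
    intro p q
    simp [PySem.Set.empty, edgesB]
  | append_singleton xs c ih =>
    rw [List.foldl_append, List.foldl_append]
    exact inv_step _ _ c ih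

-- ===== VERDICT (by name: the statement is the Claim_ definition above) =====
theorem solution_spec : Claim_equal_solution := by
  intro dirs _ _
  unfold Spec_solution solution solution_alt
  exact (inv_foldl dirs.toList).2.2.2
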